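-- pv_equiv track=rewrite | github.com/saartanel/iti0102-2019 | ex03_idcode/idcode.py | get_birth_place
-- ===== SOURCE A (Python) =====
-- def get_birth_place(birth_number: int) -> str:
--     """
--     Find the place where the person was born.
--
--     Possible locations are following: Kuressaare, Tartu, Tallinn, Kohtla-Järve, Narva, Pärnu,
--     Paide, Rakvere, Valga, Viljandi, Võru and undefined. Lastly if the number is incorrect the function must return
--     the following 'Wrong input!'
--     :param birth_number: int
--     :return: str
--     """
--     birth_place = {
--         "Kuressaare": [range(1, 11)],
--         "Tartu": [range(11, 21), range(271, 371)],
--         "Tallinn": [range(21, 221), range(471, 491)],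
--         "Kohtla-Järve": [range(221, 271)],
--         "Narva": [range(371, 421)],
--         "Pärnu": [range(421, 471)],
--         "Paide": [range(491, 521)],
--         "Rakvere": [range(521, 571)],
--         "Valga": [range(571, 601)],
--         "Viljandi": [range(601, 651)],
--         "Võru": [range(651, 711)],
--         "undefined": [range(711, 1000)]
--     }
--     error = "Wrong input!"
--     for city in birth_place:
--         range_list = birth_place[city]
--         for i in range_list:
--             while birth_number in i:
--                 return city
--     else:
--         return error
-- ===== SOURCE B (Python) =====
-- _BOUNDS = [1, 11, 21, 221, 271, 371, 421, 471, 491, 521, 571, 601, 651, 711]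
-- _CITIES = ["Kuressaare", "Tartu", "Tallinn", "Kohtla-J\u00e4rve", "Tartu", "Narva",
--            "P\u00e4rnu", "Tallinn", "Paide", "Rakvere", "Valga", "Viljandi", "V\u00f5ru", "undefined"]
--
--
-- def get_birth_place(birth_number: int) -> str:
--     if birth_number < 1 or birth_number >= 1000:
--         return "Wrong input!"
--     lo, hi = 0, len(_BOUNDS)
--     while lo < hi:  # binary search: rightmost boundary <= birth_number
--         mid = (lo + hi) // 2
--         if _BOUNDS[mid] <= birth_number:
--             lo = mid + 1
--         else:
--             hi = mid
--     return _CITIES[lo - 1]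
-- ===== Notes on version B (the rewrite author's own statement) =====
-- stated objective: alternative
-- what changed: Replaced the linear scan over a dict of range lists with a range guard plus a binary search over sorted interval start boundaries paired with a parallel city table.
import Mathlib
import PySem

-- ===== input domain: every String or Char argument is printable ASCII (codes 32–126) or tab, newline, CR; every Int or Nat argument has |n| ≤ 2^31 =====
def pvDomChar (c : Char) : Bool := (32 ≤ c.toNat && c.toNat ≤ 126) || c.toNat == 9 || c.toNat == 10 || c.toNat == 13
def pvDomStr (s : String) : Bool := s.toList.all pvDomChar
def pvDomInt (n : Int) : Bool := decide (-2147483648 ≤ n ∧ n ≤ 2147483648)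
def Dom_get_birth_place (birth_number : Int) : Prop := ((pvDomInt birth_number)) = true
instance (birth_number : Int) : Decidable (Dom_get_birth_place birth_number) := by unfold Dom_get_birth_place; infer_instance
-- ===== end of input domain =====

-- B replaces A's linear scan over a dict of range lists by a binary search over sorted
-- interval start boundaries with a parallel city table (alternative algorithm, same values).

-- ===== PORT A =====
def pvPlaces : List (String × List (Int × Int)) :=
  [("Kuressaare", [(1, 11)]),
   ("Tartu", [(11, 21), (271, 371)]),
   ("Tallinn", [(21, 221), (471, 491)]),
   ("Kohtla-Järve", [(221, 271)]),
   ("Narva", [(371, 421)]),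
   ("Pärnu", [(421, 471)]),
   ("Paide", [(491, 521)]),
   ("Rakvere", [(521, 571)]),
   ("Valga", [(571, 601)]),
   ("Viljandi", [(601, 651)]),
   ("Võru", [(651, 711)]),
   ("undefined", [(711, 1000)])]

-- the inner "for i in range_list: while n in i: return city" loop: does any range contain n?
def pvInRanges (n : Int) : List (Int × Int) → Bool
  | [] => false
  | r :: rest => decide (r.1 ≤ n ∧ n < r.2) || pvInRanges n rest

-- the outer "for city in birth_place" loop
def pvLookup (n : Int) : List (String × List (Int × Int)) → String
  | [] => "Wrong input!"
  | (city, rs) :: rest => if pvInRanges n rs then city else pvLookup n rest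

def get_birth_place (birth_number : Int) : String :=
  pvLookup birth_number pvPlaces

-- ===== PORT B =====
def pvBounds : List Int := [1, 11, 21, 221, 271, 371, 421, 471, 491, 521, 571, 601, 651, 711]

def pvCities : List String :=
  ["Kuressaare", "Tartu", "Tallinn", "Kohtla-Järve", "Tartu", "Narva",
   "Pärnu", "Tallinn", "Paide", "Rakvere", "Valga", "Viljandi", "Võru", "undefined"]

-- the while-loop of Source B; fuel 14 ≥ the number of iterations (hi - lo shrinks each step)
def pvBisect (x : Int) : Nat → Nat → Nat → Nat
  | 0, lo, _ => lo
  | fuel + 1, lo, hi =>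
      if lo < hi then
        let mid := (lo + hi) / 2
        if pvBounds.getD mid 0 ≤ x then pvBisect x fuel (mid + 1) hi
        else pvBisect x fuel lo mid
      else lo

def get_birth_place_alt (birth_number : Int) : String :=
  if birth_number < 1 ∨ 1000 ≤ birth_number then "Wrong input!"
  else pvCities.getD (pvBisect birth_number 14 0 pvBounds.length - 1) ""

-- ===== PRECONDITION & SPEC =====
def Spec_get_birth_place (birth_number : Int) (out : String) : Prop := out = get_birth_place_alt birth_number
instance (birth_number : Int) (out : String) : Decidable (Spec_get_birth_place birth_number out) := by unfold Spec_get_birth_place; infer_instance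

-- ===== CLAIM (what is proved, stated in full; the proofs are below) =====
def Claim_equal_get_birth_place : Prop := ∀ (birth_number : Int), Dom_get_birth_place birth_number → Spec_get_birth_place birth_number (get_birth_place birth_number)

-- ===== LEMMAS AND PROOFS =====

-- ===== VERDICT (by name: the statement is the Claim_ definition above) =====
set_option maxHeartbeats 4000000 in
set_option maxRecDepth 10000 in
theorem get_birth_place_spec : Claim_equal_get_birth_place := by
  intro n _
  unfold Spec_get_birth_place
  by_cases h : n < 1 ∨ 1000 ≤ n
  · have hb : get_birth_place_alt n = "Wrong input!" := by
      unfold get_birth_place_alt; rw [if_pos h]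
    rw [hb]
    simp only [get_birth_place, pvPlaces, pvLookup, pvInRanges, Bool.or_eq_true,
      decide_eq_true_eq, Bool.false_eq_true, or_false]
    rcases h with h | h <;>
      (split_ifs <;> first | rfl | omega)
  · have key : ∀ m : Nat, m < 999 →
        get_birth_place ((m : Int) + 1) = get_birth_place_alt ((m : Int) + 1) := by decide
    have hn : n = ((n - 1).toNat : Int) + 1 := by omega
    have hlt : (n - 1).toNat < 999 := by omega
    rw [hn]
    exact key _ hlt
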